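-- pv_equiv track=rewrite | github.com/isevelynovo/6265_coursework | app.py | auto_profile_column
-- ===== SOURCE A (Python) =====
-- def auto_profile_column(col_name: str, dtype: str) -> str:
--     col_lower = col_name.lower()
--
--     if any(kw in col_lower for kw in ['id', 'name', 'email', 'phone', 'ssn', 'uid']):
--         return "PII_Strong"
--
--     if any(kw in col_lower for kw in ['age', 'dob', 'birth']):
--         return "Quasi_PII_Age"
--
--     if any(kw in col_lower for kw in ['zip', 'city', 'region', 'state', 'location']):
--         return "Quasi_PII_Location"
--
--     if any(kw in col_lower for kw in ['salary', 'price', 'revenue', 'cost', 'amount', 'balance']):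
--         return "Financial"
--
--     if any(kw in col_lower for kw in ['health', 'disease', 'medical', 'blood', 'diagnosis']):
--         return "Sensitive_Medical"
--
--     if any(kw in col_lower for kw in ['dept', 'department', 'role', 'title']):
--         return "Public"
--
--     return "UNTAGGED"
-- ===== SOURCE B (Python) =====
-- # Multi-pattern text scan: walk the lowered name once position by position and look up
-- # each window of length 2..10 in a keyword->(rank, category) hash table, keeping the
-- # lowest-rank hit; A instead tests every keyword for membership in a fixed if-chain.
-- KW = {
--     "id": (0, "PII_Strong"), "name": (0, "PII_Strong"), "email": (0, "PII_Strong"),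
--     "phone": (0, "PII_Strong"), "ssn": (0, "PII_Strong"), "uid": (0, "PII_Strong"),
--     "age": (1, "Quasi_PII_Age"), "dob": (1, "Quasi_PII_Age"), "birth": (1, "Quasi_PII_Age"),
--     "zip": (2, "Quasi_PII_Location"), "city": (2, "Quasi_PII_Location"),
--     "region": (2, "Quasi_PII_Location"), "state": (2, "Quasi_PII_Location"),
--     "location": (2, "Quasi_PII_Location"),
--     "salary": (3, "Financial"), "price": (3, "Financial"), "revenue": (3, "Financial"),
--     "cost": (3, "Financial"), "amount": (3, "Financial"), "balance": (3, "Financial"),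
--     "health": (4, "Sensitive_Medical"), "disease": (4, "Sensitive_Medical"),
--     "medical": (4, "Sensitive_Medical"), "blood": (4, "Sensitive_Medical"),
--     "diagnosis": (4, "Sensitive_Medical"),
--     "dept": (5, "Public"), "department": (5, "Public"), "role": (5, "Public"),
--     "title": (5, "Public"),
-- }
--
-- LENS = [2, 3, 4, 5, 6, 7, 8, 9, 10]
--
--
-- def auto_profile_column(col_name: str, dtype: str) -> str:
--     s = col_name.lower()
--     best = None
--     for i in range(len(s)):
--         for L in LENS:
--             rc = KW.get(s[i:i + L])
--             if rc is not None and (best is None or rc[0] < best[0]):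
--                 best = rc
--     return best[1] if best is not None else "UNTAGGED"
-- ===== Notes on version B (the rewrite author's own statement) =====
-- stated objective: alternative
-- what changed: Instead of testing each of the 29 keywords for substring membership in a fixed if-chain, B scans the lowered name once position by position, looks every window of length 2..10 up in a keyword->(rank,category) hash table, and returns the category of the lowest-rank hit (UNTAGGED if none).
import Mathlib
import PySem

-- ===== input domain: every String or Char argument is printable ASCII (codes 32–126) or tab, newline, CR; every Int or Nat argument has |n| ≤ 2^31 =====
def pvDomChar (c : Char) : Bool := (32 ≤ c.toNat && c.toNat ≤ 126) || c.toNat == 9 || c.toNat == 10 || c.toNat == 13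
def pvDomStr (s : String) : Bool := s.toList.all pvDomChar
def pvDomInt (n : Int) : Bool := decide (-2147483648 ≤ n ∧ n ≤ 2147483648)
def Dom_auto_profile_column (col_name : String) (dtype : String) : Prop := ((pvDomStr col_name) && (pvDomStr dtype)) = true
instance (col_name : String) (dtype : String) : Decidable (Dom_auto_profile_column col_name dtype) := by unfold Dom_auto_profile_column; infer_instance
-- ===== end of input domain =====

-- B replaces A's per-keyword membership if-chain by a single positional scan of the
-- lowered name: every window of length 2..10 is looked up in a keyword -> (rank,
-- category) table and the lowest-rank hit wins (objective: alternative algorithm).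

-- ===== PORT A =====
def auto_profile_column (col_name : String) (dtype : String) : String :=
  let col_lower := PySem.Str.lower col_name
  if (["id", "name", "email", "phone", "ssn", "uid"]).any (fun kw => PySem.Str.isIn kw col_lower) then "PII_Strong"
  else if (["age", "dob", "birth"]).any (fun kw => PySem.Str.isIn kw col_lower) then "Quasi_PII_Age"
  else if (["zip", "city", "region", "state", "location"]).any (fun kw => PySem.Str.isIn kw col_lower) then "Quasi_PII_Location"
  else if (["salary", "price", "revenue", "cost", "amount", "balance"]).any (fun kw => PySem.Str.isIn kw col_lower) then "Financial"
  else if (["health", "disease", "medical", "blood", "diagnosis"]).any (fun kw => PySem.Str.isIn kw col_lower) then "Sensitive_Medical"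
  else if (["dept", "department", "role", "title"]).any (fun kw => PySem.Str.isIn kw col_lower) then "Public"
  else "UNTAGGED"

-- ===== PORT B =====
-- keyword -> (rank, category) table (the dict KW of Source B)
def pvKW : PySem.Dict String (Int × String) := ⟨[
  ("id", (0, "PII_Strong")), ("name", (0, "PII_Strong")), ("email", (0, "PII_Strong")),
  ("phone", (0, "PII_Strong")), ("ssn", (0, "PII_Strong")), ("uid", (0, "PII_Strong")),
  ("age", (1, "Quasi_PII_Age")), ("dob", (1, "Quasi_PII_Age")), ("birth", (1, "Quasi_PII_Age")),
  ("zip", (2, "Quasi_PII_Location")), ("city", (2, "Quasi_PII_Location")),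
  ("region", (2, "Quasi_PII_Location")), ("state", (2, "Quasi_PII_Location")),
  ("location", (2, "Quasi_PII_Location")),
  ("salary", (3, "Financial")), ("price", (3, "Financial")), ("revenue", (3, "Financial")),
  ("cost", (3, "Financial")), ("amount", (3, "Financial")), ("balance", (3, "Financial")),
  ("health", (4, "Sensitive_Medical")), ("disease", (4, "Sensitive_Medical")),
  ("medical", (4, "Sensitive_Medical")), ("blood", (4, "Sensitive_Medical")),
  ("diagnosis", (4, "Sensitive_Medical")),
  ("dept", (5, "Public")), ("department", (5, "Public")), ("role", (5, "Public")),
  ("title", (5, "Public"))]⟩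

-- window lengths tried at each position (LENS of Source B)
def pvLens : List Int := [2, 3, 4, 5, 6, 7, 8, 9, 10]

def auto_profile_column_alt (col_name : String) (dtype : String) : String :=
  let s := PySem.Str.lower col_name
  let best := (PySem.List.pyRange 0 (PySem.Str.len s)).foldl (fun best i =>
    pvLens.foldl (fun best L =>
      match PySem.Dict.get? pvKW (PySem.Str.slice s (some i) (some (i + L))) with
      | some rc =>
          match best with
          | none => some rc
          | some b => if rc.1 < b.1 then some rc else best
      | none => best) best) none
  match best with
  | some b => b.2
  | none => "UNTAGGED"

-- ===== PRECONDITION & SPEC =====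
def Spec_auto_profile_column (col_name : String) (dtype : String) (out : String) : Prop := out = auto_profile_column_alt col_name dtype
instance (col_name : String) (dtype : String) (out : String) : Decidable (Spec_auto_profile_column col_name dtype out) := by unfold Spec_auto_profile_column; infer_instance

-- ===== CLAIM (what is proved, stated in full; the proofs are below) =====
def Claim_equal_auto_profile_column : Prop := ∀ (col_name : String) (dtype : String), Dom_auto_profile_column col_name dtype → Spec_auto_profile_column col_name dtype (auto_profile_column col_name dtype)

-- ===== LEMMAS AND PROOFS =====

-- the final projection of B ('best[1] if best is not None else "UNTAGGED"')
def pvFinish (o : Option (Int × String)) : String :=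
  match o with
  | some b => b.2
  | none => "UNTAGGED"

-- the running "best" update of B's loop, as a named function
def pvStep (best : Option (Int × String)) (rc : Int × String) : Option (Int × String) :=
  match best with
  | none => some rc
  | some b => if rc.1 < b.1 then some rc else best

-- all table hits produced by B's double loop, in visit order
def pvHits (s : String) : List (Int × String) :=
  (PySem.List.pyRange 0 (PySem.Str.len s)).flatMap (fun i =>
    pvLens.filterMap (fun L => PySem.Dict.get? pvKW (PySem.Str.slice s (some i) (some (i + L)))))

theorem altB_norm (col_name dtype : String) :
    auto_profile_column_alt col_name dtype =
      pvFinish ((pvHits (PySem.Str.lower col_name)).foldl pvStep none) := by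
  have hinner : ∀ (i : Int) (b : Option (Int × String)),
      pvLens.foldl (fun best L =>
        match PySem.Dict.get? pvKW (PySem.Str.slice (PySem.Str.lower col_name) (some i) (some (i + L))) with
        | some rc => match best with
          | none => some rc
          | some bb => if rc.1 < bb.1 then some rc else best
        | none => best) b
      = (pvLens.filterMap (fun L => PySem.Dict.get? pvKW
          (PySem.Str.slice (PySem.Str.lower col_name) (some i) (some (i + L))))).foldl pvStep b := by
    intro i b
    rw [List.foldl_filterMap]
    apply PySem.List.foldl_congr_mem
    intro acc L _
    cases hg : PySem.Dict.get? pvKW (PySem.Str.slice (PySem.Str.lower col_name) (some i) (some (i + L))) <;>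
      simp [pvStep]
  simp only [auto_profile_column_alt, pvHits, pvFinish, List.foldl_flatMap]
  rw [PySem.List.foldl_congr_mem _ _ _ none (fun acc i _ => hinner i acc)]

theorem pvStep_foldl_some (l : List (Int × String)) (b : Int × String) :
    ∃ rc, l.foldl pvStep (some b) = some rc ∧ (rc = b ∨ rc ∈ l) ∧ rc.1 ≤ b.1 ∧
      ∀ x ∈ l, rc.1 ≤ x.1 := by
  induction l generalizing b with
  | nil => exact ⟨b, rfl, Or.inl rfl, le_refl _, by simp⟩
  | cons a t ih =>
    by_cases h : a.1 < b.1
    case pos =>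
      obtain ⟨rc, h1, h2, h3, h4⟩ := ih a
      refine ⟨rc, by simpa [pvStep, h] using h1, ?_, by omega, ?_⟩
      · rcases h2 with rfl | h2
        · exact Or.inr List.mem_cons_self
        · exact Or.inr (List.mem_cons_of_mem _ h2)
      · intro x hx
        rcases List.mem_cons.mp hx with rfl | hx
        · omega
        · exact h4 x hx
    case neg =>
      obtain ⟨rc, h1, h2, h3, h4⟩ := ih b
      refine ⟨rc, by simpa [pvStep, h] using h1, ?_, h3, ?_⟩
      · rcases h2 with rfl | h2
        · exact Or.inl rfl
        · exact Or.inr (List.mem_cons_of_mem _ h2)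
      · intro x hx
        rcases List.mem_cons.mp hx with rfl | hx
        · omega
        · exact h4 x hx

-- resolve B's minimum once the hit list is characterised
theorem pvResolve (l : List (Int × String)) (r : Int) (cat : String)
    (hmem : ∃ rc ∈ l, rc.1 = r)
    (hlb : ∀ rc ∈ l, r ≤ rc.1)
    (hcat : ∀ rc ∈ l, rc.1 = r → rc.2 = cat) :
    pvFinish (l.foldl pvStep none) = cat := by
  cases l with
  | nil => simp at hmem
  | cons a t =>
    have hfold : (a :: t).foldl pvStep none = t.foldl pvStep (some a) := rfl
    obtain ⟨rc, h1, h2, h3, h4⟩ := pvStep_foldl_some t a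
    have hrcmem : rc ∈ a :: t := by
      rcases h2 with h2 | h2
      · simp [h2]
      · simp [h2]
    have hub : rc.1 ≤ r := by
      obtain ⟨rc0, hrc0, hrc0r⟩ := hmem
      rcases List.mem_cons.mp hrc0 with rfl | hrc0
      · omega
      · have := h4 rc0 hrc0; omega
    have heq : rc.1 = r := le_antisymm hub (hlb rc hrcmem)
    rw [hfold, h1]
    simp only [pvFinish]
    exact hcat rc hrcmem heq

-- inverting the keyword table: a lookup result is one of its 29 entries
theorem pvKW_get?_iff (k : String) (rc : Int × String) :
    PySem.Dict.get? pvKW k = some rc ↔ (k, rc) ∈ pvKW.items :=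
  PySem.Dict.get?_eq_some_iff_mem_items pvKW k rc (by decide)

-- membership in B's hit list = some keyword of the table occurs as a window
theorem hits_mem_iff (s : String) (rc : Int × String) :
    rc ∈ pvHits s ↔ ∃ kw, PySem.Dict.get? pvKW kw = some rc ∧
      ∃ i ∈ PySem.List.pyRange 0 (PySem.Str.len s), ∃ L ∈ pvLens,
        PySem.Str.slice s (some i) (some (i + L)) = kw := by
  simp only [pvHits, List.mem_flatMap, List.mem_filterMap]
  constructor
  · rintro ⟨i, hi, L, hL, hget⟩
    exact ⟨_, hget, i, hi, L, hL, rfl⟩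
  · rintro ⟨kw, hget, i, hi, L, hL, rfl⟩
    exact ⟨i, hi, L, hL, hget⟩

-- a keyword of length 2..10 occurs as a window iff it is an infix of the string
theorem occurs_iff (kw s : String) (h2 : 2 ≤ kw.toList.length) (h10 : kw.toList.length ≤ 10) :
    (∃ i ∈ PySem.List.pyRange 0 (PySem.Str.len s), ∃ L ∈ pvLens,
      PySem.Str.slice s (some i) (some (i + L)) = kw) ↔ kw.toList <:+: s.toList := by
  constructor
  · rintro ⟨i, hi, L, hL, rfl⟩
    obtain ⟨hi0, hin⟩ := PySem.List.mem_pyRange_one.mp hi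
    have hL0 : (0 : Int) ≤ L := by fin_cases hL <;> norm_num
    have hiL : (0 : Int) ≤ i + L := by omega
    rw [PySem.Str.toList_slice, PySem.Chars.slice_eq_listSlice, PySem.List.slice_toNat _ hi0 hiL]
    exact ((List.take_prefix _ _).isInfix).trans ((List.drop_suffix _ _).isInfix)
  · intro h
    obtain ⟨t, u, htu⟩ := h
    refine ⟨(t.length : Int), ?_, (kw.toList.length : Int), ?_, ?_⟩
    · rw [PySem.List.mem_pyRange_one]
      have hlen : s.toList.length = t.length + kw.toList.length + u.length := by
        rw [← htu]; simp only [List.length_append]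
      constructor
      · positivity
      · rw [PySem.Str.len_eq]
        omega
    · have hk2 : 2 ≤ kw.toList.length := h2
      have hk10 : kw.toList.length ≤ 10 := h10
      interval_cases h : kw.toList.length <;> simp_all [pvLens]
    · rw [← String.toList_inj, PySem.Str.toList_slice, PySem.Chars.slice_eq_listSlice,
        PySem.List.slice_toNat _ (by positivity) (by positivity)]
      have h1 : ((t.length : Int) + (kw.toList.length : Int)).toNat - ((t.length : Int)).toNat
          = kw.toList.length := by omega
      rw [h1]
      simp only [Int.toNat_natCast]
      have hd : s.toList.drop t.length = kw.toList ++ u := by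
        rw [← htu, List.append_assoc]
        exact List.drop_left
      rw [hd]
      exact List.take_left

-- every hit comes from a group whose any-test fires
theorem hit_group (s : String) (rc : Int × String) (h : rc ∈ pvHits s) :
    (rc = (0, "PII_Strong") ∧ (["id", "name", "email", "phone", "ssn", "uid"]).any (fun kw => PySem.Str.isIn kw s) = true) ∨
    (rc = (1, "Quasi_PII_Age") ∧ (["age", "dob", "birth"]).any (fun kw => PySem.Str.isIn kw s) = true) ∨
    (rc = (2, "Quasi_PII_Location") ∧ (["zip", "city", "region", "state", "location"]).any (fun kw => PySem.Str.isIn kw s) = true) ∨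
    (rc = (3, "Financial") ∧ (["salary", "price", "revenue", "cost", "amount", "balance"]).any (fun kw => PySem.Str.isIn kw s) = true) ∨
    (rc = (4, "Sensitive_Medical") ∧ (["health", "disease", "medical", "blood", "diagnosis"]).any (fun kw => PySem.Str.isIn kw s) = true) ∨
    (rc = (5, "Public") ∧ (["dept", "department", "role", "title"]).any (fun kw => PySem.Str.isIn kw s) = true) := by
  obtain ⟨kw, hget, hocc⟩ := (hits_mem_iff s rc).mp h
  have hmem : (kw, rc) ∈ pvKW.items := (pvKW_get?_iff kw rc).mp hget
  simp only [pvKW, List.mem_cons, List.not_mem_nil, or_false, Prod.mk.injEq] at hmem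
  rcases hmem with ⟨rfl, rfl⟩ | ⟨rfl, rfl⟩ | ⟨rfl, rfl⟩ | ⟨rfl, rfl⟩ | ⟨rfl, rfl⟩ | ⟨rfl, rfl⟩ |
    ⟨rfl, rfl⟩ | ⟨rfl, rfl⟩ | ⟨rfl, rfl⟩ | ⟨rfl, rfl⟩ | ⟨rfl, rfl⟩ | ⟨rfl, rfl⟩ | ⟨rfl, rfl⟩ |
    ⟨rfl, rfl⟩ | ⟨rfl, rfl⟩ | ⟨rfl, rfl⟩ | ⟨rfl, rfl⟩ | ⟨rfl, rfl⟩ | ⟨rfl, rfl⟩ | ⟨rfl, rfl⟩ |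
    ⟨rfl, rfl⟩ | ⟨rfl, rfl⟩ | ⟨rfl, rfl⟩ | ⟨rfl, rfl⟩ | ⟨rfl, rfl⟩ | ⟨rfl, rfl⟩ | ⟨rfl, rfl⟩ |
    ⟨rfl, rfl⟩ | ⟨rfl, rfl⟩ <;>
  · have hin := (PySem.Str.isIn_iff_infix _ _).mpr
      ((occurs_iff _ s (by decide) (by decide)).mp hocc)
    first
    | exact Or.inl ⟨rfl, List.any_eq_true.mpr ⟨_, by decide, hin⟩⟩
    | exact Or.inr (Or.inl ⟨rfl, List.any_eq_true.mpr ⟨_, by decide, hin⟩⟩)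
    | exact Or.inr (Or.inr (Or.inl ⟨rfl, List.any_eq_true.mpr ⟨_, by decide, hin⟩⟩))
    | exact Or.inr (Or.inr (Or.inr (Or.inl ⟨rfl, List.any_eq_true.mpr ⟨_, by decide, hin⟩⟩)))
    | exact Or.inr (Or.inr (Or.inr (Or.inr (Or.inl ⟨rfl, List.any_eq_true.mpr ⟨_, by decide, hin⟩⟩))))
    | exact Or.inr (Or.inr (Or.inr (Or.inr (Or.inr ⟨rfl, List.any_eq_true.mpr ⟨_, by decide, hin⟩⟩))))

-- every keyword of a firing group contributes its group's hit
theorem hit_of_isIn (s kw : String) (rc : Int × String)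
    (hget : PySem.Dict.get? pvKW kw = some rc)
    (h2 : 2 ≤ kw.toList.length) (h10 : kw.toList.length ≤ 10)
    (hin : PySem.Str.isIn kw s = true) : rc ∈ pvHits s :=
  (hits_mem_iff s rc).mpr ⟨kw, hget,
    (occurs_iff kw s h2 h10).mpr ((PySem.Str.isIn_iff_infix kw s).mp hin)⟩

theorem resolveG0 (s : String)

    (hg : (["id", "name", "email", "phone", "ssn", "uid"].any fun kw => PySem.Str.isIn kw s) = true) :
    pvFinish ((pvHits s).foldl pvStep none) = "PII_Strong" := by
  refine pvResolve _ 0 "PII_Strong" ?_ ?_ ?_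
  · obtain ⟨kw, hm, hin⟩ := List.any_eq_true.mp hg
    refine ⟨(0, "PII_Strong"), ?_, rfl⟩
    fin_cases hm <;> exact hit_of_isIn s _ _ (by decide) (by decide) (by decide) hin
  · intro rc hrc
    rcases hit_group s rc hrc with ⟨rfl, h⟩|⟨rfl, h⟩|⟨rfl, h⟩|⟨rfl, h⟩|⟨rfl, h⟩|⟨rfl, h⟩ <;>
      first | norm_num
  · intro rc hrc hr1
    rcases hit_group s rc hrc with ⟨rfl, h⟩|⟨rfl, h⟩|⟨rfl, h⟩|⟨rfl, h⟩|⟨rfl, h⟩|⟨rfl, h⟩ <;>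
      first | rfl | (exfalso; norm_num at hr1)

theorem resolveG1 (s : String)
    (h0 : ¬ ((["id", "name", "email", "phone", "ssn", "uid"].any fun kw => PySem.Str.isIn kw s) = true))
    (hg : (["age", "dob", "birth"].any fun kw => PySem.Str.isIn kw s) = true) :
    pvFinish ((pvHits s).foldl pvStep none) = "Quasi_PII_Age" := by
  refine pvResolve _ 1 "Quasi_PII_Age" ?_ ?_ ?_
  · obtain ⟨kw, hm, hin⟩ := List.any_eq_true.mp hg
    refine ⟨(1, "Quasi_PII_Age"), ?_, rfl⟩
    fin_cases hm <;> exact hit_of_isIn s _ _ (by decide) (by decide) (by decide) hin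
  · intro rc hrc
    rcases hit_group s rc hrc with ⟨rfl, h⟩|⟨rfl, h⟩|⟨rfl, h⟩|⟨rfl, h⟩|⟨rfl, h⟩|⟨rfl, h⟩ <;>
      first | exact absurd h h0 | norm_num
  · intro rc hrc hr1
    rcases hit_group s rc hrc with ⟨rfl, h⟩|⟨rfl, h⟩|⟨rfl, h⟩|⟨rfl, h⟩|⟨rfl, h⟩|⟨rfl, h⟩ <;>
      first | rfl | exact absurd h h0 | (exfalso; norm_num at hr1)

theorem resolveG2 (s : String)
    (h0 : ¬ ((["id", "name", "email", "phone", "ssn", "uid"].any fun kw => PySem.Str.isIn kw s) = true))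
    (h1 : ¬ ((["age", "dob", "birth"].any fun kw => PySem.Str.isIn kw s) = true))
    (hg : (["zip", "city", "region", "state", "location"].any fun kw => PySem.Str.isIn kw s) = true) :
    pvFinish ((pvHits s).foldl pvStep none) = "Quasi_PII_Location" := by
  refine pvResolve _ 2 "Quasi_PII_Location" ?_ ?_ ?_
  · obtain ⟨kw, hm, hin⟩ := List.any_eq_true.mp hg
    refine ⟨(2, "Quasi_PII_Location"), ?_, rfl⟩
    fin_cases hm <;> exact hit_of_isIn s _ _ (by decide) (by decide) (by decide) hin
  · intro rc hrc
    rcases hit_group s rc hrc with ⟨rfl, h⟩|⟨rfl, h⟩|⟨rfl, h⟩|⟨rfl, h⟩|⟨rfl, h⟩|⟨rfl, h⟩ <;>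
      first | exact absurd h h0 | exact absurd h h1 | norm_num
  · intro rc hrc hr1
    rcases hit_group s rc hrc with ⟨rfl, h⟩|⟨rfl, h⟩|⟨rfl, h⟩|⟨rfl, h⟩|⟨rfl, h⟩|⟨rfl, h⟩ <;>
      first | rfl | exact absurd h h0 | exact absurd h h1 | (exfalso; norm_num at hr1)

theorem resolveG3 (s : String)
    (h0 : ¬ ((["id", "name", "email", "phone", "ssn", "uid"].any fun kw => PySem.Str.isIn kw s) = true))
    (h1 : ¬ ((["age", "dob", "birth"].any fun kw => PySem.Str.isIn kw s) = true))
    (h2 : ¬ ((["zip", "city", "region", "state", "location"].any fun kw => PySem.Str.isIn kw s) = true))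
    (hg : (["salary", "price", "revenue", "cost", "amount", "balance"].any fun kw => PySem.Str.isIn kw s) = true) :
    pvFinish ((pvHits s).foldl pvStep none) = "Financial" := by
  refine pvResolve _ 3 "Financial" ?_ ?_ ?_
  · obtain ⟨kw, hm, hin⟩ := List.any_eq_true.mp hg
    refine ⟨(3, "Financial"), ?_, rfl⟩
    fin_cases hm <;> exact hit_of_isIn s _ _ (by decide) (by decide) (by decide) hin
  · intro rc hrc
    rcases hit_group s rc hrc with ⟨rfl, h⟩|⟨rfl, h⟩|⟨rfl, h⟩|⟨rfl, h⟩|⟨rfl, h⟩|⟨rfl, h⟩ <;>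
      first | exact absurd h h0 | exact absurd h h1 | exact absurd h h2 | norm_num
  · intro rc hrc hr1
    rcases hit_group s rc hrc with ⟨rfl, h⟩|⟨rfl, h⟩|⟨rfl, h⟩|⟨rfl, h⟩|⟨rfl, h⟩|⟨rfl, h⟩ <;>
      first | rfl | exact absurd h h0 | exact absurd h h1 | exact absurd h h2 | (exfalso; norm_num at hr1)

theorem resolveG4 (s : String)
    (h0 : ¬ ((["id", "name", "email", "phone", "ssn", "uid"].any fun kw => PySem.Str.isIn kw s) = true))
    (h1 : ¬ ((["age", "dob", "birth"].any fun kw => PySem.Str.isIn kw s) = true))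
    (h2 : ¬ ((["zip", "city", "region", "state", "location"].any fun kw => PySem.Str.isIn kw s) = true))
    (h3 : ¬ ((["salary", "price", "revenue", "cost", "amount", "balance"].any fun kw => PySem.Str.isIn kw s) = true))
    (hg : (["health", "disease", "medical", "blood", "diagnosis"].any fun kw => PySem.Str.isIn kw s) = true) :
    pvFinish ((pvHits s).foldl pvStep none) = "Sensitive_Medical" := by
  refine pvResolve _ 4 "Sensitive_Medical" ?_ ?_ ?_
  · obtain ⟨kw, hm, hin⟩ := List.any_eq_true.mp hg
    refine ⟨(4, "Sensitive_Medical"), ?_, rfl⟩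
    fin_cases hm <;> exact hit_of_isIn s _ _ (by decide) (by decide) (by decide) hin
  · intro rc hrc
    rcases hit_group s rc hrc with ⟨rfl, h⟩|⟨rfl, h⟩|⟨rfl, h⟩|⟨rfl, h⟩|⟨rfl, h⟩|⟨rfl, h⟩ <;>
      first | exact absurd h h0 | exact absurd h h1 | exact absurd h h2 | exact absurd h h3 | norm_num
  · intro rc hrc hr1
    rcases hit_group s rc hrc with ⟨rfl, h⟩|⟨rfl, h⟩|⟨rfl, h⟩|⟨rfl, h⟩|⟨rfl, h⟩|⟨rfl, h⟩ <;>
      first | rfl | exact absurd h h0 | exact absurd h h1 | exact absurd h h2 | exact absurd h h3 | (exfalso; norm_num at hr1)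

theorem resolveG5 (s : String)
    (h0 : ¬ ((["id", "name", "email", "phone", "ssn", "uid"].any fun kw => PySem.Str.isIn kw s) = true))
    (h1 : ¬ ((["age", "dob", "birth"].any fun kw => PySem.Str.isIn kw s) = true))
    (h2 : ¬ ((["zip", "city", "region", "state", "location"].any fun kw => PySem.Str.isIn kw s) = true))
    (h3 : ¬ ((["salary", "price", "revenue", "cost", "amount", "balance"].any fun kw => PySem.Str.isIn kw s) = true))
    (h4 : ¬ ((["health", "disease", "medical", "blood", "diagnosis"].any fun kw => PySem.Str.isIn kw s) = true))
    (hg : (["dept", "department", "role", "title"].any fun kw => PySem.Str.isIn kw s) = true) :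
    pvFinish ((pvHits s).foldl pvStep none) = "Public" := by
  refine pvResolve _ 5 "Public" ?_ ?_ ?_
  · obtain ⟨kw, hm, hin⟩ := List.any_eq_true.mp hg
    refine ⟨(5, "Public"), ?_, rfl⟩
    fin_cases hm <;> exact hit_of_isIn s _ _ (by decide) (by decide) (by decide) hin
  · intro rc hrc
    rcases hit_group s rc hrc with ⟨rfl, h⟩|⟨rfl, h⟩|⟨rfl, h⟩|⟨rfl, h⟩|⟨rfl, h⟩|⟨rfl, h⟩ <;>
      first | exact absurd h h0 | exact absurd h h1 | exact absurd h h2 | exact absurd h h3 | exact absurd h h4 | norm_num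
  · intro rc hrc hr1
    rcases hit_group s rc hrc with ⟨rfl, h⟩|⟨rfl, h⟩|⟨rfl, h⟩|⟨rfl, h⟩|⟨rfl, h⟩|⟨rfl, h⟩ <;>
      first | rfl | exact absurd h h0 | exact absurd h h1 | exact absurd h h2 | exact absurd h h3 | exact absurd h h4

theorem resolveNone (s : String)
    (h0 : ¬ ((["id", "name", "email", "phone", "ssn", "uid"].any fun kw => PySem.Str.isIn kw s) = true))
    (h1 : ¬ ((["age", "dob", "birth"].any fun kw => PySem.Str.isIn kw s) = true))
    (h2 : ¬ ((["zip", "city", "region", "state", "location"].any fun kw => PySem.Str.isIn kw s) = true))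
    (h3 : ¬ ((["salary", "price", "revenue", "cost", "amount", "balance"].any fun kw => PySem.Str.isIn kw s) = true))
    (h4 : ¬ ((["health", "disease", "medical", "blood", "diagnosis"].any fun kw => PySem.Str.isIn kw s) = true))
    (h5 : ¬ ((["dept", "department", "role", "title"].any fun kw => PySem.Str.isIn kw s) = true)) :
    pvFinish ((pvHits s).foldl pvStep none) = "UNTAGGED" := by
  have hnil : pvHits s = [] := by
    cases hh : pvHits s with
    | nil => rfl
    | cons a t =>
      have ha : a ∈ pvHits s := by rw [hh]; exact List.mem_cons_self
      rcases hit_group s a ha with ⟨_, h⟩|⟨_, h⟩|⟨_, h⟩|⟨_, h⟩|⟨_, h⟩|⟨_, h⟩ <;>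
        first | exact absurd h h0 | exact absurd h h1 | exact absurd h h2 | exact absurd h h3 | exact absurd h h4 | exact absurd h h5
  rw [hnil]
  rfl

-- ===== VERDICT (by name: the statement is the Claim_ definition above) =====
set_option maxHeartbeats 1000000 in
theorem auto_profile_column_spec : Claim_equal_auto_profile_column := by
  intro col_name dtype _
  unfold Spec_auto_profile_column
  rw [altB_norm]
  simp only [auto_profile_column]
  set s := PySem.Str.lower col_name with hs
  by_cases h0 : (["id", "name", "email", "phone", "ssn", "uid"].any fun kw => PySem.Str.isIn kw s) = true
  · rw [if_pos h0]
    exact (resolveG0 s h0).symm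
  rw [if_neg h0]
  by_cases h1 : (["age", "dob", "birth"].any fun kw => PySem.Str.isIn kw s) = true
  · rw [if_pos h1]
    exact (resolveG1 s h0 h1).symm
  rw [if_neg h1]
  by_cases h2 : (["zip", "city", "region", "state", "location"].any fun kw => PySem.Str.isIn kw s) = true
  · rw [if_pos h2]
    exact (resolveG2 s h0 h1 h2).symm
  rw [if_neg h2]
  by_cases h3 : (["salary", "price", "revenue", "cost", "amount", "balance"].any fun kw => PySem.Str.isIn kw s) = true
  · rw [if_pos h3]
    exact (resolveG3 s h0 h1 h2 h3).symm
  rw [if_neg h3]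
  by_cases h4 : (["health", "disease", "medical", "blood", "diagnosis"].any fun kw => PySem.Str.isIn kw s) = true
  · rw [if_pos h4]
    exact (resolveG4 s h0 h1 h2 h3 h4).symm
  rw [if_neg h4]
  by_cases h5 : (["dept", "department", "role", "title"].any fun kw => PySem.Str.isIn kw s) = true
  · rw [if_pos h5]
    exact (resolveG5 s h0 h1 h2 h3 h4 h5).symm
  rw [if_neg h5]
  exact (resolveNone s h0 h1 h2 h3 h4 h5).symm
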